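-- pv_equiv track=rewrite | github.com/netsus/Rosalind | BA1N.py | list_under_d_mismatch
-- ===== SOURCE A (Python) =====
-- def list_under_d_mismatch(seq,d):
--     if d == 0: # seq에 대해 d==0 이면, seq와 0개의 염기가 다른 즉, seq와 동일한 서열 반환
--         return [seq]
--     if len(seq) == 1 and d >= 1: # seq가 1개이고, d가 1이상 이면, seq에 대해 염기가 모두 다른것을 반환
--         return [base for base in 'ATGC'] # d가 1이 아니고, 1 이상인 이유 : seq와 서열이 앞부분이 일치하고 뒤에 d보다 적게 다르면 오류
--                                         # 즉, seq과 뒷부분만 다른경우는 모든 경우를 출력한다.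
--     res=[] # 결과 담을 리스트        # 뒤에 for문에서 ATGC 순서대로 다 다르게 하나씩 맞춰가기 때문에 중복은 자동으로 걸러진다.
--
--     # extend를 사용하는 이유 : 컬렉션에 대해 항상 그 인자를 리스트의 원소로 추가하기 위함.
--     # 모든 염기에 대해
--     for base in 'ATGC':
--         if seq[0] != base: # base와 pattern의 첫문자가 다르면, 해당base로 시작, pattern의 나머지 부분에 대해 d-1로 함수 재호출
--             res.extend( base + suffix for suffix in list_under_d_mismatch(seq[1:], d-1) )
--
--         else: # base와 pattern의 첫문자가 같다면, 해당base로 시작, pattern의 나머지 부분에 대해 d로 함수 재호출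
--             res.extend( base + suffix for suffix in list_under_d_mismatch(seq[1:], d) )
--     return res
-- ===== SOURCE B (Python) =====
-- def list_under_d_mismatch(seq, d):
--     # Iterative left-to-right frontier instead of recursion: carry (prefix, budget)
--     # states; a state whose budget hits 0 is finalized by appending the untouched suffix.
--     if d == 0:
--         return [seq]
--     states = [("", d)]
--     for i in range(len(seq)):
--         new = []
--         for (s, b) in states:
--             if b == 0:
--                 new.append((s, b))
--             else:
--                 for base in 'ATGC':
--                     if base == seq[i]:
--                         new.append((s + base, b))
--                     elif b - 1 == 0:
--                         new.append((s + base + seq[i+1:], 0))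
--                     else:
--                         new.append((s + base, b - 1))
--         states = new
--     return [s for (s, b) in states]
-- ===== Notes on version B (the rewrite author's own statement) =====
-- stated objective: alternative
-- what changed: Replaces A's recursive DFS with an iterative left-to-right frontier (a worklist of (prefix, remaining-budget) states swept once per position, a state being finalized by appending the untouched suffix when its budget hits zero), keeping A's exact output order.
import Mathlib
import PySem

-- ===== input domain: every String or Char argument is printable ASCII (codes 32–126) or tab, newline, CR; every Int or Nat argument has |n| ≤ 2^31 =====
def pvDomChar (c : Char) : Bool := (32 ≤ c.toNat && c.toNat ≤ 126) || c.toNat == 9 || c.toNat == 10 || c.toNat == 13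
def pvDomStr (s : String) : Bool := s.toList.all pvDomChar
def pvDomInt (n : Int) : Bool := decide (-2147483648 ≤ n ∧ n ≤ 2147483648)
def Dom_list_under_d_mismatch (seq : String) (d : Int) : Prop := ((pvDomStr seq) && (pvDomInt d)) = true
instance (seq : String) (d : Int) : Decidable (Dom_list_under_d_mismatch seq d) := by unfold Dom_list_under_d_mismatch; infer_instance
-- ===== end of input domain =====

-- B replaces A's recursive DFS by an iterative left-to-right frontier of (prefix, budget)
-- states (objective: alternative decomposition, same cost); equivalence is on return values.

-- ===== PORT A =====
-- recursive DFS of A over the characters of seq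
def pyListA : List Char → Int → List (List Char)
  | s, d =>
    if d = 0 then [s]
    else
      match s with
      | [] => []  -- Python A raises IndexError (seq[0]) here; excluded by Pre_
      | c :: rest =>
        if rest.length = 0 ∧ 1 ≤ d then [['A'], ['T'], ['G'], ['C']]
        else
          ['A', 'T', 'G', 'C'].flatMap (fun base =>
            if c ≠ base then (pyListA rest (d - 1)).map (fun suffix => base :: suffix)
            else (pyListA rest d).map (fun suffix => base :: suffix))

def list_under_d_mismatch (seq : String) (d : Int) : List String :=
  (pyListA seq.toList d).map String.ofList

-- ===== PORT B =====
-- one frontier step: consume character c (with remaining suffix rest) in every state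
def stepB (c : Char) (rest : List Char) (states : List (List Char × Int)) :
    List (List Char × Int) :=
  states.flatMap (fun sb =>
    if sb.2 = 0 then [sb]
    else
      ['A', 'T', 'G', 'C'].flatMap (fun base =>
        if base = c then [(sb.1 ++ [base], sb.2)]
        else if sb.2 - 1 = 0 then [(sb.1 ++ [base] ++ rest, 0)]
        else [(sb.1 ++ [base], sb.2 - 1)]))

-- the `for i in range(len(seq))` loop of Source B, walking the characters of seq
def loopB : List Char → List (List Char × Int) → List (List Char × Int)
  | [], states => states
  | c :: rest, states => loopB rest (stepB c rest states)

def list_under_d_mismatch_alt (seq : String) (d : Int) : List String :=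
  if d = 0 then [seq]
  else (loopB seq.toList [([], d)]).map (fun sb => String.ofList sb.1)

-- ===== PRECONDITION & SPEC =====
-- Pre_ excludes exactly the inputs on which A raises IndexError: d < 0 (nonempty seq),
-- or seq = "" with d ≠ 0.
def Pre_list_under_d_mismatch (seq : String) (d : Int) : Prop :=
  d = 0 ∨ (1 ≤ d ∧ seq ≠ "")
instance (seq : String) (d : Int) : Decidable (Pre_list_under_d_mismatch seq d) := by
  unfold Pre_list_under_d_mismatch; infer_instance

def pvWitness_list_under_d_mismatch : String × Int := ("ATG", 1)

def Spec_list_under_d_mismatch (seq : String) (d : Int) (out : List String) : Prop :=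
  out = list_under_d_mismatch_alt seq d
instance (seq : String) (d : Int) (out : List String) :
    Decidable (Spec_list_under_d_mismatch seq d out) := by
  unfold Spec_list_under_d_mismatch; infer_instance

-- ===== CLAIM (what is proved, stated in full; the proofs are below) =====
def Claim_equal_list_under_d_mismatch : Prop :=
  ∀ (seq : String) (d : Int), Dom_list_under_d_mismatch seq d →
    Pre_list_under_d_mismatch seq d →
    Spec_list_under_d_mismatch seq d (list_under_d_mismatch seq d)

-- ===== LEMMAS AND PROOFS =====

-- the frontier invariant: all live budgets are nonnegative, and the strings reachable
-- from the frontier are exactly what A's DFS produces, state by state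
theorem loopB_strings :
    ∀ (s : List Char), s ≠ [] → ∀ (states : List (List Char × Int)),
      (∀ sb ∈ states, 0 ≤ sb.2) →
      (loopB s states).map Prod.fst
        = states.flatMap (fun sb =>
            if sb.2 = 0 then [sb.1] else (pyListA s sb.2).map (fun t => sb.1 ++ t)) := by
  intro s
  induction s with
  | nil => intro h; exact absurd rfl h
  | cons c rest ih =>
    intro _ states hnn
    by_cases hrest : rest = []
    · -- last character: loopB [c] states = stepB c [] states
      subst hrest
      simp only [loopB, stepB, List.map_flatMap]
      refine List.flatMap_congr ?_
      intro sb hsb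
      by_cases hb : sb.2 = 0
      · simp [hb]
      · have hge : 1 ≤ sb.2 := lt_of_le_of_ne (hnn sb hsb) (Ne.symm hb)
        have hA : pyListA [c] sb.2 = [['A'], ['T'], ['G'], ['C']] := by
          rw [pyListA]; simp [hb, hge]
        rw [hA]
        simp only [hb, if_false]
        by_cases h1 : sb.2 - 1 = 0 <;>
          simp [List.flatMap, h1] <;> split_ifs <;> simp
    · have hne : rest ≠ [] := hrest
      rw [loopB]
      rw [ih hne (stepB c rest states) ?inv]
      case inv =>
        intro sb hsb
        simp only [stepB, List.mem_flatMap] at hsb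
        obtain ⟨xb, hxb, hmem⟩ := hsb
        have hx := hnn xb hxb
        by_cases hb : xb.2 = 0
        · rw [if_pos hb] at hmem
          simp only [List.mem_singleton] at hmem
          subst hmem; omega
        · rw [if_neg hb] at hmem
          simp only [List.mem_flatMap] at hmem
          obtain ⟨base, _, hmem⟩ := hmem
          by_cases hc : base = c
          · rw [if_pos hc] at hmem
            simp only [List.mem_singleton] at hmem
            subst hmem
            show (0 : Int) ≤ xb.2; omega
          · rw [if_neg hc] at hmem
            by_cases h1 : xb.2 - 1 = 0
            · rw [if_pos h1] at hmem
              simp only [List.mem_singleton] at hmem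
              subst hmem
              show (0 : Int) ≤ 0; omega
            · rw [if_neg h1] at hmem
              simp only [List.mem_singleton] at hmem
              subst hmem
              show (0 : Int) ≤ xb.2 - 1; omega
      -- now flatten stepB through the flatMap and compare state by state
      simp only [stepB, List.flatMap_assoc]
      refine List.flatMap_congr ?_
      intro sb hsb
      by_cases hb : sb.2 = 0
      · simp [hb]
      · have hge : 1 ≤ sb.2 := lt_of_le_of_ne (hnn sb hsb) (Ne.symm hb)
        have hlen : ¬ (rest.length = 0 ∧ 1 ≤ sb.2) := by
          simp [List.length_eq_zero_iff, hrest]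
        have hA : pyListA (c :: rest) sb.2
            = ['A', 'T', 'G', 'C'].flatMap (fun base =>
                if c ≠ base then (pyListA rest (sb.2 - 1)).map (fun t => base :: t)
                else (pyListA rest sb.2).map (fun t => base :: t)) := by
          rw [pyListA]; simp only [hb, if_false]; rw [if_neg hlen]
        rw [hA]
        simp only [hb, if_false, List.flatMap_assoc, List.map_flatMap]
        refine List.flatMap_congr ?_
        intro base _
        by_cases hc : base = c
        · subst hc
          simp [hb, List.flatMap, Function.comp_def]
        · have hc' : c ≠ base := fun h => hc h.symm
          by_cases h1 : sb.2 - 1 = 0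
          · have hA0 : pyListA rest 0 = [rest] := by
              rw [pyListA.eq_def]; simp
            simp [hc, hc', h1, hA0, List.flatMap]
          · simp [hc, hc', h1, List.flatMap, Function.comp_def,
              List.append_assoc]

-- ===== VERDICT (by name: the statement is the Claim_ definition above) =====
theorem list_under_d_mismatch_spec : Claim_equal_list_under_d_mismatch := by
  intro seq d _ hpre
  unfold Spec_list_under_d_mismatch list_under_d_mismatch list_under_d_mismatch_alt
  rcases hpre with h0 | ⟨hd, hne⟩
  · subst h0
    rw [pyListA.eq_def]
    simp
  · have hd0 : d ≠ 0 := by omega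
    have hlist : seq.toList ≠ [] := by
      intro h
      apply hne
      have := congrArg String.ofList h
      simpa using this
    rw [if_neg hd0]
    have := loopB_strings seq.toList hlist [([], d)]
      (by intro sb hsb; simp at hsb; rw [hsb]; omega)
    have hmaps : (loopB seq.toList [([], d)]).map (fun sb => String.ofList sb.1)
        = ((loopB seq.toList [([], d)]).map Prod.fst).map String.ofList := by
      rw [List.map_map]; rfl
    rw [hmaps, this]
    simp [hd0]
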